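-- pv_equiv track=rewrite | github.com/pianistprogrammer/ABC2VEC | abc2vec_package/abc2vec/data/pipeline.py | infer_tune_type
-- ===== SOURCE A (Python) =====
-- METER_TO_TYPE = {
--     "4/4": "reel",
--     "2/2": "reel",
--     "C": "reel",
--     "C|": "reel",
--     "6/8": "jig",
--     "12/8": "double jig",
--     "9/8": "slip jig",
--     "3/8": "slip jig",
--     "2/4": "polka",
--     "3/4": "waltz",
--     "6/4": "march",
--     "4/8": "hornpipe",
-- }
--
-- TUNE_TYPE_KEYWORDS = [
--     "double jig",
--     "slip jig",
--     "single jig",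
--     "jig",
--     "hornpipe",
--     "reel",
--     "polka",
--     "waltz",
--     "march",
--     "air",
--     "strathspey",
--     "slide",
--     "mazurka",
--     "barndance",
--     "schottische",
-- ]
--
-- def infer_tune_type(abc_text: str) -> str:
--     """
--     Infer tune type from ABC notation.
--
--     Priority: R: field > T: title keywords > meter-based fallback
--
--     Args:
--         abc_text: ABC notation text
--
--     Returns:
--         Inferred tune type string (empty if unknown)
--     """
--     meter = ""
--
--     for line in abc_text.split("\n"):
--         line = line.strip()
--
--         # Direct R: rhythm field
--         if line.startswith("R:"):
--             return line[2:].strip().lower()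
--
--         # Extract meter for fallback
--         if line.startswith("M:"):
--             meter = line[2:].strip()
--
--     # Scan title for type keywords
--     for line in abc_text.split("\n"):
--         if line.strip().startswith("T:"):
--             line_lower = line.lower()
--             for keyword in TUNE_TYPE_KEYWORDS:
--                 if keyword in line_lower:
--                     return keyword
--
--     # Fallback: infer from meter
--     return METER_TO_TYPE.get(meter, "")
-- ===== SOURCE B (Python) =====
-- METER_TO_TYPE = {
--     "4/4": "reel",
--     "2/2": "reel",
--     "C": "reel",
--     "C|": "reel",
--     "6/8": "jig",
--     "12/8": "double jig",
--     "9/8": "slip jig",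
--     "3/8": "slip jig",
--     "2/4": "polka",
--     "3/4": "waltz",
--     "6/4": "march",
--     "4/8": "hornpipe",
-- }
--
-- TUNE_TYPE_KEYWORDS = [
--     "double jig",
--     "slip jig",
--     "single jig",
--     "jig",
--     "hornpipe",
--     "reel",
--     "polka",
--     "waltz",
--     "march",
--     "air",
--     "strathspey",
--     "slide",
--     "mazurka",
--     "barndance",
--     "schottische",
-- ]
--
-- def infer_tune_type(abc_text: str) -> str:
--     """Single pass over the lines instead of A's two scans."""
--     title_match = None
--     meter = ""
--     for line in abc_text.split("\n"):
--         stripped = line.strip()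
--         if stripped.startswith("R:"):
--             return stripped[2:].strip().lower()
--         if stripped.startswith("M:"):
--             meter = stripped[2:].strip()
--         elif stripped.startswith("T:") and title_match is None:
--             line_lower = line.lower()
--             for keyword in TUNE_TYPE_KEYWORDS:
--                 if keyword in line_lower:
--                     title_match = keyword
--                     break
--     if title_match is not None:
--         return title_match
--     return METER_TO_TYPE.get(meter, "")
-- ===== Notes on version B (the rewrite author's own statement) =====
-- stated objective: alternative
-- what changed: B replaces A's two full scans over the split lines (R:/M: pass, then a separate T:-keyword pass) by a single loop carrying (title_match, meter) state, returning the R: field immediately and resolving title/meter precedence after the loop.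
import Mathlib
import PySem

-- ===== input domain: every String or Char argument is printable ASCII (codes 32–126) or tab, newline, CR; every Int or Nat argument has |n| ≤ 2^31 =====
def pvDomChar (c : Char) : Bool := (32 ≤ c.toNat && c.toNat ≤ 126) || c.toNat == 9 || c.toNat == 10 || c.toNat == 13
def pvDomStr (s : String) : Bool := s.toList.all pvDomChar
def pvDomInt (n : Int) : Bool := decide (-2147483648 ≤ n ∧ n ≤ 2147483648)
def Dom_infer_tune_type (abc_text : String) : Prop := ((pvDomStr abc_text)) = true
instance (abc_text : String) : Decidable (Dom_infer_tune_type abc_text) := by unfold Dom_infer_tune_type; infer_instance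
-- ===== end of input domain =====

-- B replaces A's two scans over the split lines by a single pass carrying (title_match, meter); same return value.

-- shared module-level constants
def meterToType : PySem.Dict String String := PySem.Dict.ofList
  [("4/4", "reel"), ("2/2", "reel"), ("C", "reel"), ("C|", "reel"),
   ("6/8", "jig"), ("12/8", "double jig"), ("9/8", "slip jig"), ("3/8", "slip jig"),
   ("2/4", "polka"), ("3/4", "waltz"), ("6/4", "march"), ("4/8", "hornpipe")]

def tuneTypeKeywords : List String :=
  ["double jig", "slip jig", "single jig", "jig", "hornpipe", "reel", "polka",
   "waltz", "march", "air", "strathspey", "slide", "mazurka", "barndance", "schottische"]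

-- ===== PORT A =====
-- first loop: returns the R: value early, else threads the last meter seen
def aLoop1 : List String → String → Option String × String
  | [], meter => (none, meter)
  | l :: ls, meter =>
    let line := PySem.Str.strip l
    if PySem.Str.startswith line "R:" then
      (some (PySem.Str.lower (PySem.Str.strip (PySem.Str.slice line (some 2) none))), meter)
    else if PySem.Str.startswith line "M:" then
      aLoop1 ls (PySem.Str.strip (PySem.Str.slice line (some 2) none))
    else aLoop1 ls meter

-- inner 'for keyword in TUNE_TYPE_KEYWORDS' of A's second loop
def aFindKw : List String → String → Option String
  | [], _ => none
  | k :: ks, ll => if PySem.Str.isIn k ll then some k else aFindKw ks ll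

-- second loop over the same lines
def aLoop2 : List String → Option String
  | [] => none
  | l :: ls =>
    if PySem.Str.startswith (PySem.Str.strip l) "T:" then
      match aFindKw tuneTypeKeywords (PySem.Str.lower l) with
      | some k => some k
      | none => aLoop2 ls
    else aLoop2 ls

def infer_tune_type (abc_text : String) : String :=
  let lines := (PySem.Str.split? abc_text "\n").getD []
  match aLoop1 lines "" with
  | (some r, _) => r
  | (none, meter) =>
    match aLoop2 lines with
    | some k => k
    | none => meterToType.getD meter ""

-- ===== PORT B =====
-- inner keyword scan of B's T: branch
def bFindKw : List String → String → Option String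
  | [], _ => none
  | k :: ks, ll => if PySem.Str.isIn k ll then some k else bFindKw ks ll

-- B's single loop: state = (title_match, meter); early return on R:
def bLoop : List String → Option String → String → String
  | [], tm, meter =>
    match tm with
    | some k => k
    | none => meterToType.getD meter ""
  | l :: ls, tm, meter =>
    let stripped := PySem.Str.strip l
    if PySem.Str.startswith stripped "R:" then
      PySem.Str.lower (PySem.Str.strip (PySem.Str.slice stripped (some 2) none))
    else if PySem.Str.startswith stripped "M:" then
      bLoop ls tm (PySem.Str.strip (PySem.Str.slice stripped (some 2) none))
    else if PySem.Str.startswith stripped "T:" && tm.isNone then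
      bLoop ls (bFindKw tuneTypeKeywords (PySem.Str.lower l)) meter
    else bLoop ls tm meter

def infer_tune_type_alt (abc_text : String) : String :=
  bLoop ((PySem.Str.split? abc_text "\n").getD []) none ""

-- ===== PRECONDITION & SPEC =====
def Spec_infer_tune_type (abc_text : String) (out : String) : Prop := out = infer_tune_type_alt abc_text
instance (abc_text : String) (out : String) : Decidable (Spec_infer_tune_type abc_text out) := by unfold Spec_infer_tune_type; infer_instance

-- ===== CLAIM (what is proved, stated in full; the proofs are below) =====
def Claim_equal_infer_tune_type : Prop := ∀ (abc_text : String), Dom_infer_tune_type abc_text → Spec_infer_tune_type abc_text (infer_tune_type abc_text)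

-- ===== LEMMAS AND PROOFS =====

lemma bFindKw_eq_aFindKw (ks : List String) (ll : String) : bFindKw ks ll = aFindKw ks ll := by
  induction ks with
  | nil => rfl
  | cons k ks ih => simp [bFindKw, aFindKw, ih]

lemma startswith_two_ne (s : List Char) (a b : Char) (hab : a ≠ b)
    (h : PySem.Chars.startswith s [a, ':'] = true) :
    PySem.Chars.startswith s [b, ':'] = false := by
  rw [PySem.Chars.startswith_iff] at h
  rcases h with ⟨t, ht⟩
  apply Bool.eq_false_iff.mpr
  intro hb
  rw [PySem.Chars.startswith_iff] at hb
  rcases hb with ⟨u, hu⟩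
  rw [← ht] at hu
  simp at hu
  exact hab (hu.1.symm)

lemma bLoop_eq (ls : List String) (tm : Option String) (meter : String) :
    bLoop ls tm meter =
      match aLoop1 ls meter with
      | (some r, _) => r
      | (none, m') =>
        match tm with
        | some k => k
        | none =>
          match aLoop2 ls with
          | some k => k
          | none => meterToType.getD m' "" := by
  induction ls generalizing tm meter with
  | nil => cases tm <;> simp [bLoop, aLoop1, aLoop2]
  | cons l ls ih =>
    by_cases hR : PySem.Chars.startswith (PySem.Chars.strip l.toList) ['R', ':'] = true
    · simp [bLoop, aLoop1, hR]
    · by_cases hM : PySem.Chars.startswith (PySem.Chars.strip l.toList) ['M', ':'] = true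
      · have hT := startswith_two_ne _ 'M' 'T' (by decide) hM
        simp [bLoop, aLoop1, aLoop2, hR, hM, hT, ih]
      · by_cases hT : PySem.Chars.startswith (PySem.Chars.strip l.toList) ['T', ':'] = true
        · cases tm with
          | some k => simp [bLoop, aLoop1, hR, hM, hT, ih]
          | none =>
            rw [show bLoop (l :: ls) none meter
                  = bLoop ls (bFindKw tuneTypeKeywords (PySem.Str.lower l)) meter by
                  simp [bLoop, hR, hM, hT]]
            rw [bFindKw_eq_aFindKw]
            cases hK : aFindKw tuneTypeKeywords (PySem.Str.lower l) with
            | some k => simp [aLoop1, aLoop2, hR, hM, hT, hK, ih]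
            | none => simp [aLoop1, aLoop2, hR, hM, hT, hK, ih]
        · simp [bLoop, aLoop1, aLoop2, hR, hM, hT, ih]

-- ===== VERDICT (by name: the statement is the Claim_ definition above) =====
theorem infer_tune_type_spec : Claim_equal_infer_tune_type := by
  intro abc _
  unfold Spec_infer_tune_type infer_tune_type infer_tune_type_alt
  rw [bLoop_eq]
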